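-- pv_equiv track=rewrite | github.com/hoanghiep1945/Python | basic/PY01011.py | SoDep
-- ===== SOURCE A (Python) =====
-- def check(n) :
--     s = str(n)
--     return s == s[::-1]
--
-- def SoDep(n):
--     if(check(n) == False) : return False
--     Sum = 0
--     while n>0:
--         if(n%10 != 0 and n%10 != 2 and n%10 != 4 and n%10 != 6 and n%10 != 8):
--             return False
--         Sum += 1
--         n//=10
--     return Sum%2 == 0
-- ===== SOURCE B (Python) =====
-- def SoDep(n):
--     rev = 0
--     count = 0
--     temp = n
--     while temp > 0:
--         d = temp % 10
--         if d not in (0, 2, 4, 6, 8):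
--             return False
--         rev = rev * 10 + d
--         count += 1
--         temp //= 10
--     return rev == n and count % 2 == 0
-- ===== Notes on version B (the rewrite author's own statement) =====
-- stated objective: alternative
-- what changed: Fused A's string-slicing palindrome check and separate digit loop into one arithmetic pass that reverses the integer, validates even digits and counts them simultaneously, with no string conversion and no helper.
import Mathlib
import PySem

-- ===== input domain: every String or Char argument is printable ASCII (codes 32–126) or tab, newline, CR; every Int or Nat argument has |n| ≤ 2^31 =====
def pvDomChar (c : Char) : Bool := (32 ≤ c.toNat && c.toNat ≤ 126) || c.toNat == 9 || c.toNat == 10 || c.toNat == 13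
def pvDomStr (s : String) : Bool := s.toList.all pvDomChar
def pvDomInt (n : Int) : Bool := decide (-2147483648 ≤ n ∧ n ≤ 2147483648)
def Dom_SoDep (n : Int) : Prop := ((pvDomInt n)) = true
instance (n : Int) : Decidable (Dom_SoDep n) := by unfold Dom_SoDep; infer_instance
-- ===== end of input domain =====

-- B fuses A's string-slicing palindrome check and digit loop into one arithmetic pass
-- (integer reversal + even-digit validation + digit count); same values on every Int.

-- ===== PORT A =====
-- check(n): s = str(n); return s == s[::-1]
def SoDepCheck (n : Int) : Bool :=
  let s := PySem.Int.toStr n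
  s == (PySem.Str.slice? s none none (-1)).getD s

-- the 'while n>0' loop of A, carrying Sum; after the loop: return Sum%2 == 0.
-- fuel = n.toNat bounds the iteration count (n shrinks by //10 each step), so the
-- fuel-0 branch is only reached with n <= 0, where it returns the after-loop value.
def SoDepLoop : Nat -> Int -> Int -> Bool
  | 0, _, Sum => PySem.Int.mod Sum 2 == 0
  | fuel + 1, n, Sum =>
    if n > 0 then
      if PySem.Int.mod n 10 != 0 && PySem.Int.mod n 10 != 2 && PySem.Int.mod n 10 != 4 &&
          PySem.Int.mod n 10 != 6 && PySem.Int.mod n 10 != 8 then false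
      else SoDepLoop fuel (PySem.Int.floordiv n 10) (Sum + 1)
    else PySem.Int.mod Sum 2 == 0

def SoDep (n : Int) : Bool :=
  if SoDepCheck n == false then false else SoDepLoop n.toNat n 0

-- ===== PORT B =====
-- the 'while temp>0' loop of B, carrying rev and count; after the loop:
-- return rev == n and count % 2 == 0. Same fuel discipline as above.
def SoDepAltLoop : Nat -> Int -> Int -> Int -> Int -> Bool
  | 0, n, _, rev, count => rev == n && PySem.Int.mod count 2 == 0
  | fuel + 1, n, temp, rev, count =>
    if temp > 0 then
      let d := PySem.Int.mod temp 10
      if !(d == 0 || d == 2 || d == 4 || d == 6 || d == 8) then false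
      else SoDepAltLoop fuel n (PySem.Int.floordiv temp 10) (rev * 10 + d) (count + 1)
    else rev == n && PySem.Int.mod count 2 == 0

def SoDep_alt (n : Int) : Bool := SoDepAltLoop n.toNat n n 0 0

-- ===== PRECONDITION & SPEC =====
def Spec_SoDep (n : Int) (out : Bool) : Prop := out = SoDep_alt n
instance (n : Int) (out : Bool) : Decidable (Spec_SoDep n out) := by unfold Spec_SoDep; infer_instance

-- ===== CLAIM (what is proved, stated in full; the proofs are below) =====
def Claim_equal_SoDep : Prop := ∀ (n : Int), Dom_SoDep n → Spec_SoDep n (SoDep n)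

-- ===== LEMMAS AND PROOFS =====

-- list-level model of A's loop over the little-endian digit list
def goA : List Nat → Int → Bool
  | [], S => PySem.Int.mod S 2 == 0
  | d :: ds, S => if d % 2 = 1 then false else goA ds (S + 1)

-- list-level model of B's loop over the little-endian digit list
def goB : List Nat → Int → Int → Int → Bool
  | [], n, rev, count => rev == n && PySem.Int.mod count 2 == 0
  | d :: ds, n, rev, count =>
      if d % 2 = 1 then false else goB ds n (rev * 10 + (d : Int)) (count + 1)

lemma condA (d : Nat) (hd : d < 10) :
    (((d:Int) != 0) && ((d:Int) != 2) && ((d:Int) != 4) && ((d:Int) != 6) && ((d:Int) != 8))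
      = decide (d % 2 = 1) := by
  interval_cases d <;> decide

lemma condB (d : Nat) (hd : d < 10) :
    (!(((d:Int) == 0) || ((d:Int) == 2) || ((d:Int) == 4) || ((d:Int) == 6) || ((d:Int) == 8)))
      = decide (d % 2 = 1) := by
  interval_cases d <;> decide

lemma loopA_eq (fuel m : Nat) (S : Int) (hm : m ≤ fuel) :
    SoDepLoop fuel (m : Int) S = goA (Nat.digits 10 m) S := by
  induction fuel generalizing m S with
  | zero =>
    have : m = 0 := by omega
    subst this
    simp [SoDepLoop, goA]
  | succ fuel ih =>
    rcases Nat.eq_zero_or_pos m with h0 | hpos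
    · subst h0; simp [SoDepLoop, goA]
    · have hc : ((m:Int)) > 0 := by exact_mod_cast hpos
      rw [Nat.digits_def' (by norm_num) hpos]
      rw [SoDepLoop.eq_def]
      simp only [if_pos hc]
      rw [PySem.Int.mod_eq_emod_of_pos (by omega), PySem.Int.floordiv_eq_ediv_of_pos (by omega)]
      have h1 : (m:Int) % 10 = ((m % 10 : Nat) : Int) := by push_cast; ring
      have h2 : (m:Int) / 10 = ((m / 10 : Nat) : Int) := by push_cast; ring
      rw [h1, h2, condA _ (Nat.mod_lt _ (by norm_num))]
      simp only [goA]
      by_cases h : m % 10 % 2 = 1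
      · simp [h]
      · simp only [h, decide_false, Bool.false_eq_true, if_false]
        exact ih (m / 10) (S + 1)
          (by have := Nat.div_lt_self hpos (by norm_num : 1 < 10); omega)

lemma loopB_eq (fuel m : Nat) (n rev count : Int) (hm : m ≤ fuel) :
    SoDepAltLoop fuel n (m : Int) rev count = goB (Nat.digits 10 m) n rev count := by
  induction fuel generalizing m rev count with
  | zero =>
    have : m = 0 := by omega
    subst this
    simp [SoDepAltLoop, goB]
  | succ fuel ih =>
    rcases Nat.eq_zero_or_pos m with h0 | hpos
    · subst h0; simp [SoDepAltLoop, goB]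
    · have hc : ((m:Int)) > 0 := by exact_mod_cast hpos
      rw [Nat.digits_def' (by norm_num) hpos]
      rw [SoDepAltLoop.eq_def]
      simp only [if_pos hc]
      rw [PySem.Int.mod_eq_emod_of_pos (by omega), PySem.Int.floordiv_eq_ediv_of_pos (by omega)]
      have h1 : (m:Int) % 10 = ((m % 10 : Nat) : Int) := by push_cast; ring
      have h2 : (m:Int) / 10 = ((m / 10 : Nat) : Int) := by push_cast; ring
      rw [h1, h2, condB _ (Nat.mod_lt _ (by norm_num))]
      simp only [goB]
      by_cases h : m % 10 % 2 = 1
      · simp [h]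
      · simp only [h, decide_false, Bool.false_eq_true, if_false]
        exact ih (m / 10) _ _
          (by have := Nat.div_lt_self hpos (by norm_num : 1 < 10); omega)

lemma goA_allEven (ds : List Nat) (S : Int) (h : ∀ d ∈ ds, d % 2 = 0) :
    goA ds S = (PySem.Int.mod (S + ds.length) 2 == 0) := by
  induction ds generalizing S with
  | nil => simp [goA]
  | cons d ds ih =>
    have hd := h d (by simp)
    simp only [goA, hd]
    rw [if_neg (by omega), ih _ (fun x hx => h x (by simp [hx]))]
    congr 2
    simp only [List.length_cons]
    push_cast
    omega

lemma goA_hasOdd (ds : List Nat) (S : Int) (h : ∃ d ∈ ds, d % 2 = 1) :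
    goA ds S = false := by
  induction ds generalizing S with
  | nil => simp at h
  | cons d ds ih =>
    simp only [goA]
    by_cases hd : d % 2 = 1
    · simp [hd]
    · rw [if_neg hd]
      rcases h with ⟨x, hx, hx1⟩
      rcases List.mem_cons.mp hx with rfl | hmem
      · omega
      · exact ih _ ⟨x, hmem, hx1⟩

lemma goB_allEven (ds : List Nat) (n rev count : Int) (h : ∀ d ∈ ds, d % 2 = 0) :
    goB ds n rev count =
      ((rev * 10 ^ ds.length + ((Nat.ofDigits 10 ds.reverse : ℕ) : Int)) == n
        && PySem.Int.mod (count + ds.length) 2 == 0) := by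
  induction ds generalizing rev count with
  | nil => simp [goB]
  | cons d ds ih =>
    have hd := h d (by simp)
    simp only [goB]
    rw [if_neg (by omega), ih _ _ (fun x hx => h x (by simp [hx]))]
    have eN : Nat.ofDigits 10 (ds.reverse ++ [d]) = Nat.ofDigits 10 ds.reverse + 10 ^ ds.length * d := by
      rw [Nat.ofDigits_append, Nat.ofDigits_singleton, List.length_reverse]
    have e1 : (rev * 10 + (d:Int)) * 10 ^ ds.length + ((Nat.ofDigits 10 ds.reverse : ℕ) : Int)
        = rev * 10 ^ (d :: ds).length + ((Nat.ofDigits 10 ((d :: ds).reverse) : ℕ) : Int) := by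
      simp only [List.reverse_cons, List.length_cons, eN]
      push_cast
      ring
    have e2 : count + 1 + (ds.length : Int) = count + ((d :: ds).length : Int) := by
      simp only [List.length_cons]; push_cast; ring
    rw [e1, e2]

lemma goB_hasOdd (ds : List Nat) (n rev count : Int) (h : ∃ d ∈ ds, d % 2 = 1) :
    goB ds n rev count = false := by
  induction ds generalizing rev count with
  | nil => simp at h
  | cons d ds ih =>
    simp only [goB]
    by_cases hd : d % 2 = 1
    · simp [hd]
    · rw [if_neg hd]
      rcases h with ⟨x, hx, hx1⟩
      rcases List.mem_cons.mp hx with rfl | hmem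
      · omega
      · exact ih _ _ ⟨x, hmem, hx1⟩

lemma ofDigits_inj (l₁ : List Nat) : ∀ l₂ : List Nat, l₁.length = l₂.length →
    (∀ x ∈ l₁, x < 10) → (∀ x ∈ l₂, x < 10) →
    Nat.ofDigits 10 l₁ = Nat.ofDigits 10 l₂ → l₁ = l₂ := by
  induction l₁ with
  | nil => intro l₂ hlen _ _ _; cases l₂ <;> simp_all
  | cons d ds ih =>
    intro l₂ hlen h1 h2 hv
    cases l₂ with
    | nil => simp at hlen
    | cons e es =>
      simp only [Nat.ofDigits_cons] at hv
      have hd : d < 10 := h1 d (by simp)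
      have he : e < 10 := h2 e (by simp)
      have hde : d = e ∧ Nat.ofDigits 10 ds = Nat.ofDigits 10 es := by
        constructor <;> omega
      rw [hde.1, ih es (by simpa using hlen) (fun x hx => h1 x (by simp [hx]))
        (fun x hx => h2 x (by simp [hx])) hde.2]

lemma digitChar_inj (a b : Nat) (ha : a < 10) (hb : b < 10)
    (h : Nat.digitChar a = Nat.digitChar b) : a = b := by
  interval_cases a <;> interval_cases b <;> first | rfl | (exfalso; exact absurd h (by decide))

lemma digitChar_ne_dash (a : Nat) (ha : a < 10) : Nat.digitChar a ≠ '-' := by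
  interval_cases a <;> decide

lemma map_digitChar_inj (l₁ : List Nat) : ∀ l₂ : List Nat,
    (∀ x ∈ l₁, x < 10) → (∀ x ∈ l₂, x < 10) →
    l₁.map Nat.digitChar = l₂.map Nat.digitChar → l₁ = l₂ := by
  induction l₁ with
  | nil => intro l₂ _ _ h; cases l₂ <;> simp_all
  | cons d ds ih =>
    intro l₂ h1 h2 h
    cases l₂ with
    | nil => simp at h
    | cons e es =>
      simp only [List.map_cons, List.cons.injEq] at h
      rw [digitChar_inj d e (h1 d (by simp)) (h2 e (by simp)) h.1,
        ih es (fun x hx => h1 x (by simp [hx])) (fun x hx => h2 x (by simp [hx])) h.2]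

lemma toDigitsCore_eq : ∀ (f m : Nat) (acc : List Char), 0 < m → m < f →
    Nat.toDigitsCore 10 f m acc = ((Nat.digits 10 m).map Nat.digitChar).reverse ++ acc := by
  intro f
  induction f with
  | zero => intro m acc h1 h2; omega
  | succ f ih =>
    intro m acc h1 h2
    rw [Nat.toDigitsCore]
    rw [Nat.digits_def' (by norm_num : 1 < 10) h1]
    rcases Nat.eq_zero_or_pos (m / 10) with h0 | hpos
    · simp [h0]
    · rw [if_neg (by omega)]
      rw [ih (m / 10) _ hpos (by have := Nat.div_lt_self h1 (by norm_num : 1 < 10); omega)]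
      simp

lemma toDigits_eq (m : Nat) (h : 0 < m) :
    Nat.toDigits 10 m = ((Nat.digits 10 m).map Nat.digitChar).reverse := by
  rw [Nat.toDigits, toDigitsCore_eq (m + 1) m [] h (by omega), List.append_nil]

lemma check_pos (n : Int) (h : 0 < n) :
    SoDepCheck n = decide (Nat.digits 10 n.toNat = (Nat.digits 10 n.toNat).reverse) := by
  have hts : (PySem.Int.toStr n).toList = ((Nat.digits 10 n.toNat).map Nat.digitChar).reverse := by
    rw [PySem.Int.toList_toStr, PySem.Int.toChars, if_neg (by omega),
      toDigits_eq n.toNat (by omega)]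
  rw [SoDepCheck]
  rw [PySem.Str.slice?_none_none_neg_one]
  simp only [Option.getD_some]
  have hb : ∀ s t : String, (s == t) = decide (s.toList = t.toList) := by
    intro s t
    by_cases hl : s.toList = t.toList
    · have hst : s = t := String.ext_iff.mpr hl
      simp [hst]
    · have hne : s ≠ t := fun e => hl (congrArg String.toList e)
      simp [hl, hne]
  rw [hb, String.toList_ofList, hts]
  have hlt : ∀ x ∈ Nat.digits 10 n.toNat, x < 10 :=
    fun x hx => Nat.digits_lt_base (by norm_num) hx
  rw [decide_eq_decide]
  rw [List.reverse_reverse]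
  constructor
  · intro hmm
    have h2 : (Nat.digits 10 n.toNat).reverse.map Nat.digitChar
        = (Nat.digits 10 n.toNat).map Nat.digitChar := by
      rw [List.map_reverse]; exact hmm
    exact (map_digitChar_inj _ _ (fun x hx => hlt x (by simpa using hx)) hlt h2).symm
  · intro hpal
    rw [← List.map_reverse, ← hpal]

lemma check_neg (n : Int) (h : n < 0) : SoDepCheck n = false := by
  have hpos : 0 < n.natAbs := by omega
  have hts : (PySem.Int.toStr n).toList
      = '-' :: ((Nat.digits 10 n.natAbs).map Nat.digitChar).reverse := by
    rw [PySem.Int.toList_toStr, PySem.Int.toChars, if_pos h, toDigits_eq n.natAbs hpos]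
  rw [SoDepCheck]
  rw [PySem.Str.slice?_none_none_neg_one]
  simp only [Option.getD_some]
  rw [Bool.eq_false_iff]
  intro heq
  have heq' : (PySem.Int.toStr n).toList = (PySem.Int.toStr n).toList.reverse := by
    have := eq_of_beq heq
    conv_lhs => rw [this]
    rw [String.toList_ofList]
  rw [hts] at heq'
  simp only [List.reverse_cons, List.reverse_reverse] at heq'
  rcases hne : Nat.digits 10 n.natAbs with _ | ⟨d, ds⟩
  · exact absurd hne (Nat.digits_ne_nil_iff_ne_zero.mpr (by omega))
  · rw [hne] at heq'
    simp only [List.map_cons, List.cons_append] at heq'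
    have : '-' = Nat.digitChar d := (List.cons.injEq _ _ _ _ ▸ heq').1
    exact digitChar_ne_dash d
      (Nat.digits_lt_base (by norm_num) (hne ▸ List.mem_cons_self)) this.symm

theorem SoDep_eq_alt (n : Int) : SoDep n = SoDep_alt n := by
  rcases lt_trichotomy n 0 with hn | hn | hn
  · have h0 : n.toNat = 0 := by omega
    rw [SoDep, check_neg n hn, SoDep_alt, h0]
    simp only [SoDepAltLoop, beq_self_eq_true, if_true]
    have : ((0:Int) == n) = false := by simp; omega
    rw [this, Bool.false_and]
  · subst hn; decide
  · obtain ⟨m, rfl⟩ : ∃ m : Nat, n = (m : Int) := ⟨n.toNat, by omega⟩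
    have hm : (0:Nat) < m := by exact_mod_cast hn
    have htn : ((m:Int)).toNat = m := Int.toNat_natCast m
    rw [SoDep, SoDep_alt, htn, check_pos _ hn, Int.toNat_natCast,
      loopA_eq m m 0 le_rfl, loopB_eq m m _ 0 0 le_rfl]
    set dgs := Nat.digits 10 m with hdgs
    by_cases hodd : ∀ d ∈ dgs, d % 2 = 0
    · rw [goA_allEven _ _ hodd, goB_allEven _ _ _ _ hodd]
      by_cases hpal : dgs = dgs.reverse
      · have hval : (Nat.ofDigits 10 dgs.reverse : ℕ) = m := by
          rw [← hpal, hdgs, Nat.ofDigits_digits]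
        have hA : ((decide (dgs = dgs.reverse)) == false) = false := by
          rw [decide_eq_true hpal]; rfl
        have hB : ((0 * 10 ^ dgs.length + ((Nat.ofDigits 10 dgs.reverse : ℕ) : Int)) == (m:Int))
            = true := by
          rw [beq_iff_eq, zero_mul, zero_add]
          exact_mod_cast hval
        rw [hA, hB, Bool.true_and]
        rw [if_neg (by simp)]
      · have hval : (Nat.ofDigits 10 dgs.reverse : ℕ) ≠ m := by
          intro hv
          have hv2 : Nat.ofDigits 10 dgs.reverse = Nat.ofDigits 10 dgs := by
            rw [hv, hdgs, Nat.ofDigits_digits]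
          have hlt : ∀ x ∈ dgs, x < 10 :=
            fun x hx => Nat.digits_lt_base (by norm_num) hx
          exact hpal (ofDigits_inj dgs.reverse dgs (by simp)
            (fun x hx => hlt x (by simpa using hx)) hlt hv2).symm
        have hA : ((decide (dgs = dgs.reverse)) == false) = true := by
          rw [decide_eq_false hpal]; rfl
        have hB : ((0 * 10 ^ dgs.length + ((Nat.ofDigits 10 dgs.reverse : ℕ) : Int)) == (m:Int))
            = false := by
          rw [beq_eq_false_iff_ne, zero_mul, zero_add]
          intro hc
          exact hval (by exact_mod_cast hc)
        rw [hA, hB, Bool.false_and]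
        rw [if_pos rfl]
    · have hodd' : ∃ d ∈ dgs, d % 2 = 1 := by
        push Not at hodd
        rcases hodd with ⟨d, hd, hd1⟩
        exact ⟨d, hd, by omega⟩
      rw [goA_hasOdd _ _ hodd', goB_hasOdd _ _ _ _ hodd']
      rw [ite_self]

-- ===== VERDICT (by name: the statement is the Claim_ definition above) =====
theorem SoDep_spec : Claim_equal_SoDep := by
  intro n _
  unfold Spec_SoDep
  exact SoDep_eq_alt n
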